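-- pv_equiv track=rewrite | github.com/rcolomina/ALOCC_Keras | finger_print_on_product.py | get_map_names_to_indices
-- ===== SOURCE A (Python) =====
-- def get_map_names_to_indices(list_samples):
--     '''
--     Calculate map to list of indices with same prefix filename
--     '''
--     list_samples = [x.split('__')[0] for x in list_samples]
--
--     map_product_to_indeces={}
--     for index,item in enumerate(list_samples):
--         if item in map_product_to_indeces:
--             map_product_to_indeces[item].append(index)
--         else:
--             map_product_to_indeces[item] = [index]
--     return map_product_to_indeces
-- ===== SOURCE B (Python) =====
-- def get_map_names_to_indices(list_samples):
--     '''
--     Calculate map to list of indices with same prefix filename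
--     '''
--     prefixes = [x.split('__')[0] for x in list_samples]
--     return {p: [i for i, q in enumerate(prefixes) if q == p]
--             for p in dict.fromkeys(prefixes)}
-- ===== Notes on version B (the rewrite author's own statement) =====
-- stated objective: alternative
-- what changed: Replaces the incremental dict loop (membership test, append-or-create per element) by a declarative two-phase form: dedupe the prefixes in first-occurrence order, then build the dict in one comprehension whose value for each prefix is the filtered list of its indices.
import Mathlib
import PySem

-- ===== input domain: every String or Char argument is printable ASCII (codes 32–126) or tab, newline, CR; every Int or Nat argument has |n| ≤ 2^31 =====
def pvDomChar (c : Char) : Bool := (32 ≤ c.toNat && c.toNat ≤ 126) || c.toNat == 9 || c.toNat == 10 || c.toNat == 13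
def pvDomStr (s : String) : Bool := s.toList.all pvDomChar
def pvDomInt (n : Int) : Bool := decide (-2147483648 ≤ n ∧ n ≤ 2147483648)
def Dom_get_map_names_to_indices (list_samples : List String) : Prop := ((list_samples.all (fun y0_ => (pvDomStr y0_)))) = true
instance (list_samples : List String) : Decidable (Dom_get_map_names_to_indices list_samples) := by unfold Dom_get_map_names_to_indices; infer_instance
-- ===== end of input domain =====

-- B replaces A's incremental dict loop by dedupe-then-filter per prefix (alternative decomposition, not faster).

-- x.split('__')[0]; exact: split? with the non-empty literal separator returns `some` of a non-empty list
def pvPrefix (x : String) : String := ((PySem.Str.split? x "__").getD []).headD ""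

-- ===== PORT A =====
def get_map_names_to_indices (list_samples : List String) : List (String × List Int) :=
  let prefixes := list_samples.map pvPrefix
  ((PySem.List.enumerate prefixes 0).foldl
    (fun d p =>
      if d.contains p.2 then d.modify p.2 [] (fun v => v ++ [p.1])  -- d[item].append(index)
      else d.insert p.2 [p.1])                                      -- d[item] = [index]
    PySem.Dict.empty).items

-- ===== PORT B =====
def get_map_names_to_indices_alt (list_samples : List String) : List (String × List Int) :=
  let prefixes := list_samples.map pvPrefix
  (PySem.List.dedup prefixes).map
    (fun p => (p, ((PySem.List.enumerate prefixes 0).filter (fun q => q.2 == p)).map (·.1)))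

-- ===== PRECONDITION & SPEC =====
def Spec_get_map_names_to_indices (list_samples : List String) (out : List (String × List Int)) : Prop := out = get_map_names_to_indices_alt list_samples
instance (list_samples : List String) (out : List (String × List Int)) : Decidable (Spec_get_map_names_to_indices list_samples out) := by unfold Spec_get_map_names_to_indices; infer_instance

-- ===== CLAIM (what is proved, stated in full; the proofs are below) =====
def Claim_equal_get_map_names_to_indices : Prop := ∀ (list_samples : List String), Dom_get_map_names_to_indices list_samples → Spec_get_map_names_to_indices list_samples (get_map_names_to_indices list_samples)

-- ===== LEMMAS AND PROOFS =====

-- A's two branches are both `modify`: on a missing key, modify with default [] inserts [index]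
theorem pv_step_eq_modify {κ : Type} [BEq κ] [LawfulBEq κ] (d : PySem.Dict κ (List Int)) (k : κ) (i : Int) :
    (if d.contains k then d.modify k [] (fun v => v ++ [i]) else d.insert k [i])
      = d.modify k [] (fun v => v ++ [i]) := by
  by_cases h : d.contains k
  · simp [h]
  · simp only [Bool.not_eq_true] at h
    simp [h, PySem.Dict.modify, PySem.Dict.getD_of_not_contains _ _ h]

theorem pv_fold_eq_modify (l : List (Int × String)) (d : PySem.Dict String (List Int)) :
    l.foldl (fun d p => if d.contains p.2 then d.modify p.2 [] (fun v => v ++ [p.1])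
                        else d.insert p.2 [p.1]) d
      = l.foldl (fun d p => d.modify p.2 [] (fun v => v ++ [p.1])) d := by
  induction l generalizing d with
  | nil => rfl
  | cons p t ih => rw [List.foldl_cons, List.foldl_cons, pv_step_eq_modify]; exact ih _

theorem pv_main (prefixes : List String) :
    ((PySem.List.enumerate prefixes 0).foldl
      (fun d p => if d.contains p.2 then d.modify p.2 [] (fun v => v ++ [p.1])
                  else d.insert p.2 [p.1]) PySem.Dict.empty).items
    = (PySem.List.dedup prefixes).map
        (fun p => (p, ((PySem.List.enumerate prefixes 0).filter (fun q => q.2 == p)).map (·.1))) := by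
  rw [pv_fold_eq_modify]
  set l := PySem.List.enumerate prefixes 0 with hl
  -- rewrite the fold over (index, item) pairs as a fold keyed on the first component
  have hswap : l.foldl (fun d p => d.modify p.2 [] (fun v => v ++ [p.1])) PySem.Dict.empty
      = (l.map Prod.swap).foldl (fun d p => d.modify p.1 [] (fun v => v ++ [p.2])) PySem.Dict.empty := by
    rw [List.foldl_map]; rfl
  rw [hswap]
  set d := (l.map Prod.swap).foldl (fun d p => d.modify p.1 [] (fun v => v ++ [p.2])) PySem.Dict.empty with hd
  have hnd : d.keys.Nodup := by
    rw [hd]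
    have := PySem.Dict.nodup_keys_foldl_modify_key (l.map Prod.swap) (fun p => p.1) []
      (fun _ p => fun v => v ++ [p.2]) PySem.Dict.empty (by simp [PySem.Dict.keys_empty])
    simpa using this
  have hkeys : d.keys = PySem.List.dedup prefixes := by
    rw [hd]
    have := PySem.Dict.keys_foldl_modify_key (l.map Prod.swap) (fun p => p.1) []
      (fun _ p => fun v => v ++ [p.2]) PySem.Dict.empty
    simp only at this
    rw [this]
    have : (l.map Prod.swap).map (fun p => p.1) = prefixes := by
      simp [List.map_map, Function.comp_def, Prod.swap]
      exact PySem.List.map_snd_enumerate prefixes 0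
    rw [this, PySem.List.dedup_eq_ofList]
    simp only [PySem.Dict.keys_empty]
    exact PySem.Set.update_nil_left prefixes
  have hval : ∀ c, d.getD c [] = (l.filter (fun q => q.2 == c)).map (·.1) := by
    intro c
    rw [hd]
    have h := PySem.Dict.getD_foldl_modify_append (l.map Prod.swap) PySem.Dict.empty c
    simp only [PySem.Dict.getD_empty, List.nil_append] at h
    rw [h, List.filter_map]
    simp [Function.comp_def, Prod.swap, List.map_map]
  rw [PySem.Dict.items_eq_map_keys d hnd [], hkeys]
  exact List.map_congr_left (fun p _ => by rw [hval p])

theorem pv_ports_agree (list_samples : List String) :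
    get_map_names_to_indices list_samples = get_map_names_to_indices_alt list_samples :=
  pv_main (list_samples.map pvPrefix)

-- ===== VERDICT (by name: the statement is the Claim_ definition above) =====
theorem get_map_names_to_indices_spec : Claim_equal_get_map_names_to_indices := by
  intro xs _
  unfold Spec_get_map_names_to_indices
  exact pv_ports_agree xs
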